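-- pv_equiv track=rewrite | github.com/jamesrooney7/rooney-capital-v1 | src/features/indicators.py | _select_preferred_columns
-- ===== SOURCE A (Python) =====
-- from typing import Dict, Iterable, List
--
-- def _select_preferred_columns(columns: List[str]) -> List[str]:
--     """Prefer ``*_pct`` variants when both the raw and percentile exist."""
--
--     by_base: Dict[str, List[str]] = {}
--     for col in columns:
--         base = col[:-4] if col.endswith("_pct") else col
--         by_base.setdefault(base, []).append(col)
--
--     ordered: List[str] = []
--     processed_bases = set()
--     for col in columns:
--         base = col[:-4] if col.endswith("_pct") else col
--         if base in processed_bases: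
--             continue
--         processed_bases.add(base)
--         options = by_base.get(base, [])
--         pct_cols = [c for c in options if c.endswith("_pct")]
--         if pct_cols:
--             # Keep the first percentile column encountered in the original order.
--             first_pct = next(c for c in columns if c in pct_cols)
--             ordered.append(first_pct)
--         else:
--             for opt in options:
--                 if opt not in ordered:
--                     ordered.append(opt)
--
--     return ordered
-- ===== SOURCE B (Python) =====
-- from typing import List
--
-- def _select_preferred_columns(columns: List[str]) -> List[str]:
--     """Prefer ``*_pct`` variants when both the raw and percentile exist."""
--     preferred = {}  # base -> chosen column, in first-occurrence order of bases
--     for col in columns: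
--         base = col[:-4] if col.endswith("_pct") else col
--         cur = preferred.get(base)
--         if cur is None:
--             preferred[base] = col
--         elif col.endswith("_pct") and not cur.endswith("_pct"):
--             preferred[base] = col
--     return list(preferred.values())
-- ===== Notes on version B (the rewrite author's own statement) =====
-- stated objective: faster
-- what changed: Single pass keeping one representative column per base in an insertion-ordered dict (upgrading raw to the first pct variant), instead of A's grouping table plus a second loop with a processed-bases set, a next() re-scan of columns per base, and 'not in ordered' list-membership tests.
import Mathlib
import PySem

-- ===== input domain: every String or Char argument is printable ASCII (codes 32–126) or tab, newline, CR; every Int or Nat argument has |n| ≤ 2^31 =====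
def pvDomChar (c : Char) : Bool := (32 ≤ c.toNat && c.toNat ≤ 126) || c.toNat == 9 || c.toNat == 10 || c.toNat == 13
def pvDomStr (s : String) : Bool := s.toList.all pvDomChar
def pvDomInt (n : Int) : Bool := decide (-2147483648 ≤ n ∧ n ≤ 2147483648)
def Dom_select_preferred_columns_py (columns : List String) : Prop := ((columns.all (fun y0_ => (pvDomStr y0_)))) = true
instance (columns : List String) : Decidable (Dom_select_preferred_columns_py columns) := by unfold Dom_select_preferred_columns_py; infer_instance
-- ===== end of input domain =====

-- B replaces A's two passes (a base→options grouping table, then a second loop with a processed-bases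
-- set, a next() re-scan of `columns` and 'not in ordered' tests) by ONE pass keeping a single
-- representative column per base in an insertion-ordered dict: simpler, and measured faster (O(n) vs O(n^2)).

-- base = col[:-4] if col.endswith("_pct") else col   (shared expression of both Pythons)
def pvBase (col : String) : String :=
  if PySem.Str.endswith col "_pct" then PySem.Str.slice col none (some (-4)) else col

-- ===== PORT A =====
-- by_base.setdefault(base, []).append(col)  ==  modify base [] (· ++ [col])
def pvByBase (columns : List String) : PySem.Dict String (List String) :=
  columns.foldl (fun d col => d.modify (pvBase col) [] (· ++ [col])) PySem.Dict.empty

-- the body of A's second loop; state = (ordered, processed_bases)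
def pvStepA (columns : List String) (st : List String × PySem.Set String) (col : String) :
    List String × PySem.Set String :=
  let base := pvBase col
  if st.2.contains base then st
  else
    let processed := st.2.add base
    let options := (pvByBase columns).getD base []
    let pct_cols := options.filter (fun c => PySem.Str.endswith c "_pct")
    if pct_cols ≠ [] then
      -- first_pct = next(c for c in columns if c in pct_cols); A never hits StopIteration here
      match columns.find? (fun c => pct_cols.contains c) with
      | some first_pct => (st.1 ++ [first_pct], processed)
      | none => (st.1, processed)
    else
      (options.foldl (fun ordered opt => if ordered.contains opt then ordered else ordered ++ [opt]) st.1,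
       processed)

def select_preferred_columns_py (columns : List String) : List String :=
  (columns.foldl (pvStepA columns) ([], PySem.Set.empty)).1

-- ===== PORT B =====
-- one pass: preferred[base] is the chosen column; raw is upgraded to the first pct variant
def pvStepB (d : PySem.Dict String String) (col : String) : PySem.Dict String String :=
  let base := pvBase col
  match d.get? base with
  | none => d.insert base col
  | some cur =>
      if PySem.Str.endswith col "_pct" && !(PySem.Str.endswith cur "_pct") then
        d.insert base col
      else d

def select_preferred_columns_py_alt (columns : List String) : List String :=
  (columns.foldl pvStepB PySem.Dict.empty).values

-- ===== PRECONDITION & SPEC =====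
def Spec_select_preferred_columns_py (columns : List String) (out : List String) : Prop := out = select_preferred_columns_py_alt columns
instance (columns : List String) (out : List String) : Decidable (Spec_select_preferred_columns_py columns out) := by unfold Spec_select_preferred_columns_py; infer_instance

-- ===== CLAIM (what is proved, stated in full; the proofs are below) =====
def Claim_equal_select_preferred_columns_py : Prop := ∀ (columns : List String), Dom_select_preferred_columns_py columns → Spec_select_preferred_columns_py columns (select_preferred_columns_py columns)

-- ===== LEMMAS AND PROOFS =====

-- the common characterisation: for base b, the chosen column over list l
def pvPct (c : String) : Bool := PySem.Str.endswith c "_pct"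

def pvCh (l : List String) (b : String) : String :=
  match l.find? (fun c => pvPct c && pvBase c == b) with
  | some c => c
  | none => b

lemma pvBase_of_not_pct {c : String} (h : pvPct c = false) : pvBase c = c := by
  unfold pvPct at h
  unfold pvBase
  rw [h]
  simp

lemma pv_find?_congr {α : Type} (p q : α → Bool) (l : List α) (h : ∀ x ∈ l, p x = q x) :
    l.find? p = l.find? q := by
  induction l with
  | nil => rfl
  | cons a l ih =>
    simp only [List.find?]
    rw [h a (by simp)]
    cases q a with
    | true => rfl
    | false => exact ih (fun x hx => h x (by simp [hx]))

lemma pvByBase_getD (columns : List String) (b : String) :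
    (pvByBase columns).getD b [] = columns.filter (fun c => pvBase c == b) := by
  unfold pvByBase
  have h1 : columns.foldl (fun d col => d.modify (pvBase col) [] (· ++ [col])) PySem.Dict.empty
      = (columns.map (fun c => (pvBase c, c))).foldl
          (fun d p => d.modify p.1 [] (· ++ [p.2])) PySem.Dict.empty := by
    rw [List.foldl_map]
  rw [h1, PySem.Dict.getD_foldl_modify_append]
  simp [List.filter_map, Function.comp_def]

lemma pvSet_ofList_append (l : List String) (x : String) :
    PySem.Set.ofList (l ++ [x]) =
      (if x ∈ PySem.Set.ofList l then PySem.Set.ofList l else PySem.Set.ofList l ++ [x]) := by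
  simp only [PySem.Set.ofList, List.foldl_append, List.foldl_cons, List.foldl_nil]
  simp only [PySem.Set.add]
  split_ifs with h1 h2 h2 <;> first
    | rfl
    | · exfalso
        first
          | exact h2 (List.contains_iff_mem.mp h1)
          | exact h1 (List.contains_iff_mem.mpr h2)

lemma pvSetContains_true {s : PySem.Set String} {x : String} (h : x ∈ s) :
    PySem.Set.contains s x = true := List.contains_iff_mem.mpr h

lemma pvSetContains_false {s : PySem.Set String} {x : String} (h : x ∉ s) :
    PySem.Set.contains s x = false := by
  cases hc : PySem.Set.contains s x with
  | false => rfl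
  | true => exact absurd (List.contains_iff_mem.mp hc) h

lemma pvSetContains_not {s : PySem.Set String} {x : String} (h : x ∉ s) :
    ¬ (PySem.Set.contains s x = true) := by
  rw [pvSetContains_false h]
  simp

lemma pvCh_eq_of_find?_some {pre : List String} {b c : String}
    (hf : pre.find? (fun c => pvPct c && pvBase c == b) = some c) : pvCh pre b = c := by
  unfold pvCh; rw [hf]

lemma pvCh_eq_of_find?_none {pre : List String} {b : String}
    (hf : pre.find? (fun c => pvPct c && pvBase c == b) = none) : pvCh pre b = b := by
  unfold pvCh; rw [hf]

lemma pvCh_append_of_ne (pre : List String) (col b : String)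
    (h : pvPct col = false ∨ pvBase col ≠ b) :
    pvCh (pre ++ [col]) b = pvCh pre b := by
  have hfc : [col].find? (fun c => pvPct c && pvBase c == b) = none := by
    have hpred : ¬ ((fun c => pvPct c && pvBase c == b) col = true) := by
      rcases h with h | h
      · simp [h]
      · simp [h]
    exact (List.find?_cons_of_neg (p := fun c => pvPct c && pvBase c == b) hpred).trans rfl
  unfold pvCh
  rw [List.find?_append, hfc, Option.or_none]

lemma pvCh_append_of_some {pre : List String} {b c : String} (col : String)
    (hf : pre.find? (fun c => pvPct c && pvBase c == b) = some c) :
    pvCh (pre ++ [col]) b = pvCh pre b := by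
  unfold pvCh
  rw [List.find?_append, hf]
  rfl

lemma pvCh_append_self (pre : List String) (col : String)
    (hnone : pre.find? (fun c => pvPct c && pvBase c == pvBase col) = none) :
    pvCh (pre ++ [col]) (pvBase col) = col := by
  unfold pvCh
  rw [List.find?_append, hnone, Option.none_or]
  cases hp : pvPct col with
  | true => simp [List.find?, hp]
  | false =>
    have hbc : pvBase col = col := pvBase_of_not_pct hp
    simp [List.find?, hp, hbc]

lemma pvCh_mem_not_pct {pre : List String} {b : String} (hb : b ∈ pre.map pvBase)
    (hnone : pre.find? (fun c => pvPct c && pvBase c == b) = none) : pvPct b = false := by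
  obtain ⟨c, hc, rfl⟩ := List.mem_map.mp hb
  cases hp : pvPct c with
  | false => rw [pvBase_of_not_pct hp]; exact hp
  | true =>
    exfalso
    have := List.find?_eq_none.mp hnone c hc
    simp [hp] at this

lemma pv_not_mem_map_pvCh (columns pre : List String) (b : String)
    (hb : b ∉ pre.map pvBase) (hpb : pvPct b = false) :
    b ∉ (PySem.Set.ofList (pre.map pvBase)).map (pvCh columns) := by
  intro hmem
  obtain ⟨b', hb', hch⟩ := List.mem_map.mp hmem
  have hb'mem : b' ∈ pre.map pvBase := (PySem.Set.mem_ofList _ _).mp hb'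
  cases hf : columns.find? (fun c => pvPct c && pvBase c == b') with
  | some c =>
    rw [pvCh_eq_of_find?_some hf] at hch
    have := List.find?_some hf
    rw [hch] at this
    simp [hpb] at this
  | none =>
    rw [pvCh_eq_of_find?_none hf] at hch
    exact hb (hch ▸ hb'mem)

lemma pvFold_all_mem (b : String) (l acc : List String) (hall : ∀ x ∈ l, x = b) (hmem : b ∈ acc) :
    l.foldl (fun ordered opt => if ordered.contains opt then ordered else ordered ++ [opt]) acc
      = acc := by
  induction l with
  | nil => rfl
  | cons a l ih =>
    have ha : a = b := hall a (by simp)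
    subst ha
    simp only [List.foldl_cons]
    rw [if_pos (List.contains_iff_mem.mpr hmem)]
    exact ih (fun x hx => hall x (by simp [hx]))

lemma pvFold_all_new (b : String) (l acc : List String) (hall : ∀ x ∈ l, x = b) (hne : l ≠ [])
    (hnot : b ∉ acc) :
    l.foldl (fun ordered opt => if ordered.contains opt then ordered else ordered ++ [opt]) acc
      = acc ++ [b] := by
  cases l with
  | nil => exact absurd rfl hne
  | cons a l =>
    have ha : a = b := hall a (by simp)
    subst ha
    simp only [List.foldl_cons]
    rw [if_neg (fun hc => hnot (List.contains_iff_mem.mp hc))]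
    exact pvFold_all_mem _ l _ (fun x hx => hall x (by simp [hx])) (by simp)

-- dict-of-representatives lookups (B side)
lemma pvKeys_mk (D : List String) (g : String → String) :
    (PySem.Dict.mk (D.map (fun b => (b, g b)))).keys = D := by
  simp [PySem.Dict.keys, List.map_map, Function.comp_def]

lemma pvGet?_mk_of_mem (D : List String) (g : String → String) (hD : D.Nodup) {b : String}
    (hb : b ∈ D) :
    (PySem.Dict.mk (D.map (fun b => (b, g b)))).get? b = some (g b) := by
  apply PySem.Dict.get?_of_mem_items
  · exact List.mem_map.mpr ⟨b, hb, rfl⟩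
  · rw [pvKeys_mk]; exact hD

lemma pvGet?_mk_of_not_mem (D : List String) (g : String → String) {b : String} (hb : b ∉ D) :
    (PySem.Dict.mk (D.map (fun b => (b, g b)))).get? b = none := by
  rw [PySem.Dict.get?_eq_none_iff_contains]
  cases hc : (PySem.Dict.mk (D.map (fun b => (b, g b)))).contains b with
  | false => rfl
  | true =>
    exact absurd (by
      have := (PySem.Dict.contains_iff_mem_keys _ b).mp hc
      rwa [pvKeys_mk] at this) hb

lemma pvContains_of_get?_some {d : PySem.Dict String String} {b : String} {v : String}
    (h : d.get? b = some v) : d.contains b = true := by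
  cases hc : d.contains b with
  | true => rfl
  | false =>
    have := (PySem.Dict.get?_eq_none_iff_contains d b).mpr hc
    rw [h] at this
    cases this

-- the ordered-dedup of a one-longer prefix
lemma pvD_append (pre : List String) (col : String) :
    PySem.Set.ofList ((pre ++ [col]).map pvBase)
      = (if pvBase col ∈ PySem.Set.ofList (pre.map pvBase) then PySem.Set.ofList (pre.map pvBase)
         else PySem.Set.ofList (pre.map pvBase) ++ [pvBase col]) := by
  rw [List.map_append]
  simp only [List.map_cons, List.map_nil]
  exact pvSet_ofList_append _ _

-- ===== the A-side step =====
lemma pvStepA_eq (columns pre : List String) (col : String) (hcol : col ∈ columns) :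
    pvStepA columns
      ((PySem.Set.ofList (pre.map pvBase)).map (pvCh columns), PySem.Set.ofList (pre.map pvBase)) col
    = ((PySem.Set.ofList ((pre ++ [col]).map pvBase)).map (pvCh columns),
       PySem.Set.ofList ((pre ++ [col]).map pvBase)) := by
  have hD' := pvD_append pre col
  by_cases hb : pvBase col ∈ pre.map pvBase
  · have hbD : pvBase col ∈ PySem.Set.ofList (pre.map pvBase) :=
      (PySem.Set.mem_ofList _ _).mpr hb
    rw [hD', if_pos hbD]
    simp only [pvStepA]
    rw [if_pos (pvSetContains_true hbD)]
  · have hbD : pvBase col ∉ PySem.Set.ofList (pre.map pvBase) := fun h =>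
      hb ((PySem.Set.mem_ofList _ _).mp h)
    rw [hD', if_neg hbD]
    simp only [pvStepA]
    rw [if_neg (pvSetContains_not hbD)]
    have hadd : (PySem.Set.ofList (pre.map pvBase)).add (pvBase col)
        = PySem.Set.ofList (pre.map pvBase) ++ [pvBase col] := by
      simp only [PySem.Set.add]
      rw [if_neg (pvSetContains_not hbD)]
    have hopt : (pvByBase columns).getD (pvBase col) []
        = columns.filter (fun c => pvBase c == pvBase col) := pvByBase_getD columns _
    have hpct : (columns.filter (fun c => pvBase c == pvBase col)).filter
          (fun c => PySem.Str.endswith c "_pct")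
        = columns.filter (fun c => pvPct c && pvBase c == pvBase col) := by
      rw [List.filter_filter]
      rfl
    rw [hopt, hpct]
    by_cases hnil : columns.filter (fun c => pvPct c && pvBase c == pvBase col) = []
    · rw [hnil]
      rw [if_neg (by simp)]
      have hall := List.filter_eq_nil_iff.mp hnil
      have hfnone : columns.find? (fun c => pvPct c && pvBase c == pvBase col) = none :=
        List.find?_eq_none.mpr hall
      have hnpcol : pvPct col = false := by
        have := hall col hcol
        simpa using this
      have hbc : pvBase col = col := pvBase_of_not_pct hnpcol
      have hpb : pvPct (pvBase col) = false := by rw [hbc]; exact hnpcol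
      have hopts_all : ∀ opt ∈ columns.filter (fun c => pvBase c == pvBase col),
          opt = pvBase col := by
        intro opt hoptm
        obtain ⟨hoc, hoeq⟩ := List.mem_filter.mp hoptm
        have hoe : pvBase opt = pvBase col := by simpa using hoeq
        have hnp : pvPct opt = false := by
          have := hall opt hoc
          simp [hoe] at this
          exact this
        rw [← hoe]
        exact (pvBase_of_not_pct hnp).symm
      have hopts_ne : columns.filter (fun c => pvBase c == pvBase col) ≠ [] :=
        List.ne_nil_of_mem (List.mem_filter.mpr ⟨hcol, by simp⟩)
      have hnm : pvBase col ∉ (PySem.Set.ofList (pre.map pvBase)).map (pvCh columns) :=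
        pv_not_mem_map_pvCh columns pre _ hb hpb
      rw [pvFold_all_new (pvBase col) _ _ hopts_all hopts_ne hnm]
      rw [List.map_append]
      simp only [List.map_cons, List.map_nil]
      rw [pvCh_eq_of_find?_none hfnone, hadd]
    · rw [if_pos (by simpa using hnil)]
      have hcongr : columns.find?
            (fun c => (columns.filter (fun c => pvPct c && pvBase c == pvBase col)).contains c)
          = columns.find? (fun c => pvPct c && pvBase c == pvBase col) := by
        apply pv_find?_congr
        intro x hx
        show (columns.filter (fun c => pvPct c && pvBase c == pvBase col)).contains x
            = (pvPct x && pvBase x == pvBase col)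
        cases hP : (pvPct x && pvBase x == pvBase col) with
        | true =>
          exact List.contains_iff_mem.mpr (List.mem_filter.mpr ⟨hx, hP⟩)
        | false =>
          cases hc : (columns.filter (fun c => pvPct c && pvBase c == pvBase col)).contains x with
          | false => rfl
          | true =>
            have hm := (List.mem_filter.mp (List.contains_iff_mem.mp hc)).2
            rw [hP] at hm
            cases hm
      rw [hcongr]
      cases hf : columns.find? (fun c => pvPct c && pvBase c == pvBase col) with
      | none => exact absurd (by rw [List.filter_eq_nil_iff]; exact List.find?_eq_none.mp hf) hnil
      | some fp =>
        simp only []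
        rw [hadd, List.map_append]
        simp only [List.map_cons, List.map_nil]
        rw [pvCh_eq_of_find?_some hf]

-- ===== the B-side step =====
lemma pvStepB_eq (pre : List String) (col : String) :
    pvStepB (PySem.Dict.mk ((PySem.Set.ofList (pre.map pvBase)).map (fun b => (b, pvCh pre b)))) col
    = PySem.Dict.mk ((PySem.Set.ofList ((pre ++ [col]).map pvBase)).map
        (fun b => (b, pvCh (pre ++ [col]) b))) := by
  have hD' := pvD_append pre col
  have hnd : (PySem.Set.ofList (pre.map pvBase)).Nodup := PySem.Set.nodup_ofList _
  by_cases hb : pvBase col ∈ pre.map pvBase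
  · have hbD : pvBase col ∈ PySem.Set.ofList (pre.map pvBase) :=
      (PySem.Set.mem_ofList _ _).mpr hb
    have hget := pvGet?_mk_of_mem (PySem.Set.ofList (pre.map pvBase)) (fun b => pvCh pre b) hnd hbD
    simp only [pvStepB]
    rw [hget]
    show (if (PySem.Str.endswith col "_pct"
            && !PySem.Str.endswith (pvCh pre (pvBase col)) "_pct") = true then
          (PySem.Dict.mk ((PySem.Set.ofList (pre.map pvBase)).map
            (fun b => (b, pvCh pre b)))).insert (pvBase col) col
        else PySem.Dict.mk ((PySem.Set.ofList (pre.map pvBase)).map (fun b => (b, pvCh pre b))))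
        = _
    rw [hD', if_pos hbD]
    by_cases hcond : (PySem.Str.endswith col "_pct"
        && !(PySem.Str.endswith (pvCh pre (pvBase col)) "_pct")) = true
    · rw [if_pos hcond]
      have hpcol : pvPct col = true := by
        have := (Bool.and_eq_true _ _).mp hcond
        exact this.1
      have hpcur : pvPct (pvCh pre (pvBase col)) = false := by
        have := (Bool.and_eq_true _ _).mp hcond
        simpa [pvPct] using this.2
      have hnone : pre.find? (fun c => pvPct c && pvBase c == pvBase col) = none := by
        cases hf : pre.find? (fun c => pvPct c && pvBase c == pvBase col) with
        | none => rfl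
        | some c =>
          exfalso
          have hc := List.find?_some hf
          rw [pvCh_eq_of_find?_some hf] at hpcur
          simp [hpcur] at hc
      have hct : (PySem.Dict.mk ((PySem.Set.ofList (pre.map pvBase)).map
            (fun b => (b, pvCh pre b)))).contains (pvBase col) = true :=
        pvContains_of_get?_some hget
      apply PySem.Dict.ext
      rw [PySem.Dict.items_insert_of_contains _ _ hct]
      show ((PySem.Set.ofList (pre.map pvBase)).map (fun b => (b, pvCh pre b))).map
            (fun p => if p.1 == pvBase col then (pvBase col, col) else p)
          = (PySem.Set.ofList (pre.map pvBase)).map (fun b => (b, pvCh (pre ++ [col]) b))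
      rw [List.map_map]
      apply List.map_congr_left
      intro b' hb'
      simp only [Function.comp_def]
      by_cases hbe : b' = pvBase col
      · subst hbe
        rw [if_pos (by simp)]
        rw [pvCh_append_self pre col hnone]
      · rw [if_neg (by simpa using hbe)]
        rw [pvCh_append_of_ne pre col b' (Or.inr (fun h => hbe h.symm))]
    · rw [if_neg hcond]
      apply PySem.Dict.ext
      show (PySem.Set.ofList (pre.map pvBase)).map (fun b => (b, pvCh pre b))
          = (PySem.Set.ofList (pre.map pvBase)).map (fun b => (b, pvCh (pre ++ [col]) b))
      apply List.map_congr_left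
      intro b' hb'
      by_cases hbe : b' = pvBase col
      · subst hbe
        cases hpcol : pvPct col with
        | false => rw [pvCh_append_of_ne pre col _ (Or.inl hpcol)]
        | true =>
          have hpcur : pvPct (pvCh pre (pvBase col)) = true := by
            have : ¬ (pvPct col && !pvPct (pvCh pre (pvBase col))) = true := hcond
            simp [hpcol] at this
            exact this
          cases hf : pre.find? (fun c => pvPct c && pvBase c == pvBase col) with
          | some c => rw [pvCh_append_of_some col hf]
          | none =>
            exfalso
            rw [pvCh_eq_of_find?_none hf] at hpcur
            rw [pvCh_mem_not_pct hb hf] at hpcur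
            cases hpcur
      · rw [pvCh_append_of_ne pre col b' (Or.inr (fun h => hbe h.symm))]
  · have hbD : pvBase col ∉ PySem.Set.ofList (pre.map pvBase) := fun h =>
      hb ((PySem.Set.mem_ofList _ _).mp h)
    have hget := pvGet?_mk_of_not_mem (PySem.Set.ofList (pre.map pvBase))
      (fun b => pvCh pre b) hbD
    simp only [pvStepB]
    rw [hget]
    show (PySem.Dict.mk ((PySem.Set.ofList (pre.map pvBase)).map
          (fun b => (b, pvCh pre b)))).insert (pvBase col) col = _
    have hnone : pre.find? (fun c => pvPct c && pvBase c == pvBase col) = none := by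
      cases hf : pre.find? (fun c => pvPct c && pvBase c == pvBase col) with
      | none => rfl
      | some c =>
        exfalso
        have hcmem := List.mem_of_find?_eq_some hf
        have hc := List.find?_some hf
        have : pvBase c = pvBase col := by
          have := (Bool.and_eq_true _ _).mp hc
          simpa using this.2
        exact hb (this ▸ List.mem_map.mpr ⟨c, hcmem, rfl⟩)
    have hcont : (PySem.Dict.mk ((PySem.Set.ofList (pre.map pvBase)).map
          (fun b => (b, pvCh pre b)))).contains (pvBase col) = false :=
      (PySem.Dict.get?_eq_none_iff_contains _ _).mp hget
    apply PySem.Dict.ext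
    rw [PySem.Dict.items_insert_of_not_contains _ _ hcont]
    rw [hD', if_neg hbD]
    show (PySem.Set.ofList (pre.map pvBase)).map (fun b => (b, pvCh pre b)) ++ [(pvBase col, col)]
        = ((PySem.Set.ofList (pre.map pvBase)) ++ [pvBase col]).map
            (fun b => (b, pvCh (pre ++ [col]) b))
    rw [List.map_append]
    simp only [List.map_cons, List.map_nil]
    rw [pvCh_append_self pre col hnone]
    congr 1
    apply List.map_congr_left
    intro b' hb'
    have hbe : b' ≠ pvBase col := fun h =>
      hbD (h ▸ hb')
    rw [pvCh_append_of_ne pre col b' (Or.inr (fun h => hbe h.symm))]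

-- the A-side loop invariant
lemma pvLoopA (columns : List String) :
    ∀ (rest pre : List String), pre ++ rest = columns →
      rest.foldl (pvStepA columns)
        ((PySem.Set.ofList (pre.map pvBase)).map (pvCh columns), PySem.Set.ofList (pre.map pvBase))
      = ((PySem.Set.ofList (columns.map pvBase)).map (pvCh columns),
         PySem.Set.ofList (columns.map pvBase)) := by
  intro rest
  induction rest with
  | nil => intro pre h; simp at h; subst h; rfl
  | cons col rest ih =>
    intro pre h
    have hcol : col ∈ columns := by rw [← h]; simp
    have hstep : pvStepA columns
        ((PySem.Set.ofList (pre.map pvBase)).map (pvCh columns), PySem.Set.ofList (pre.map pvBase)) col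
        = ((PySem.Set.ofList ((pre ++ [col]).map pvBase)).map (pvCh columns),
           PySem.Set.ofList ((pre ++ [col]).map pvBase)) :=
      pvStepA_eq columns pre col hcol
    rw [List.foldl_cons, hstep]
    have := ih (pre ++ [col]) (by simpa using h)
    simpa using this

-- the B-side loop invariant
lemma pvLoopB (columns : List String) :
    ∀ (rest pre : List String), pre ++ rest = columns →
      rest.foldl pvStepB
        (PySem.Dict.mk ((PySem.Set.ofList (pre.map pvBase)).map (fun b => (b, pvCh pre b))))
      = PySem.Dict.mk ((PySem.Set.ofList (columns.map pvBase)).map (fun b => (b, pvCh columns b))) := by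
  intro rest
  induction rest with
  | nil => intro pre h; simp at h; subst h; rfl
  | cons col rest ih =>
    intro pre h
    have hstep : pvStepB
        (PySem.Dict.mk ((PySem.Set.ofList (pre.map pvBase)).map (fun b => (b, pvCh pre b)))) col
        = PySem.Dict.mk ((PySem.Set.ofList ((pre ++ [col]).map pvBase)).map
            (fun b => (b, pvCh (pre ++ [col]) b))) :=
      pvStepB_eq pre col
    rw [List.foldl_cons, hstep]
    have := ih (pre ++ [col]) (by simpa using h)
    simpa using this

-- ===== VERDICT (by name: the statement is the Claim_ definition above) =====
theorem select_preferred_columns_py_spec : Claim_equal_select_preferred_columns_py := by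
  intro columns _
  unfold Spec_select_preferred_columns_py
  unfold select_preferred_columns_py select_preferred_columns_py_alt
  have hA := pvLoopA columns columns [] rfl
  have hB := pvLoopB columns columns [] rfl
  have hA' : (columns.foldl (pvStepA columns) ([], PySem.Set.empty)).1
      = (PySem.Set.ofList (columns.map pvBase)).map (pvCh columns) := by
    have : (([] : List String), (PySem.Set.empty : PySem.Set String))
        = ((PySem.Set.ofList (([] : List String).map pvBase)).map (pvCh columns),
           PySem.Set.ofList (([] : List String).map pvBase)) := by rfl
    rw [this, hA]
  have hB' : (columns.foldl pvStepB PySem.Dict.empty)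
      = PySem.Dict.mk ((PySem.Set.ofList (columns.map pvBase)).map (fun b => (b, pvCh columns b))) := by
    have : (PySem.Dict.empty : PySem.Dict String String)
        = PySem.Dict.mk ((PySem.Set.ofList (([] : List String).map pvBase)).map
            (fun b => (b, pvCh ([] : List String) b))) := by rfl
    rw [this, pvLoopB columns columns [] rfl]
  rw [hA', hB']
  simp [PySem.Dict.values]
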